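-- pv_equiv track=rewrite | github.com/cwjwudi/br-mysql-connector | Python/SqlRepeater.py | extract_values_suffix
-- ===== SOURCE A (Python) =====
-- def extract_values_suffix(s, n):
--     """
--     查找字符串中所有'VALUES'后面的n个字符，并将它们拼接起来返回。
--     如果未找到'VALUES'或后面不足n个字符，则跳过该部分。
--     """
--     result = []
--     idx = s.find('VALUES')
--     while idx != -1:
--         start = idx + len('VALUES')
--         if start + n <= len(s):
--             result.append(s[start:start+n])
--         idx = s.find('VALUES', start)
--     return ''.join(result)
-- ===== SOURCE B (Python) =====
-- def extract_values_suffix(s, n):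
--     L = len(s)
--     parts = [s[i + 6:i + 6 + n] for i in range(L)
--              if s.startswith('VALUES', i) and i + 6 + n <= L]
--     return ''.join(parts)
-- ===== Notes on version B (the rewrite author's own statement) =====
-- stated objective: alternative
-- what changed: Replaces find's jump-and-resume while loop (mutating index state) with a single stateless comprehension that tests every position with startswith and joins the qualifying slices; correct because 'VALUES' cannot overlap itself.
import Mathlib
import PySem

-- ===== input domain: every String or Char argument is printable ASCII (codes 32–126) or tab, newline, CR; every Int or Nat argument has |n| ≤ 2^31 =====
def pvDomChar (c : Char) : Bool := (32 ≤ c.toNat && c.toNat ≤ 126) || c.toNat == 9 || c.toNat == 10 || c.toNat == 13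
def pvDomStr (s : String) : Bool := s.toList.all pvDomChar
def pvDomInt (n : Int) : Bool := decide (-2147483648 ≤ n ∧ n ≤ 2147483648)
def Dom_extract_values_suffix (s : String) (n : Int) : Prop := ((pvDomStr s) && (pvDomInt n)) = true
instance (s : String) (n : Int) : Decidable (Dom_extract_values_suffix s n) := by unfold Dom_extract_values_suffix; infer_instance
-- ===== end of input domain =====

-- B replaces A's find-driven jump-and-resume while loop by a stateless single pass that tests
-- every position with startswith and joins the qualifying slices (objective: alternative).


-- the literal 'VALUES'
def pvVALUES : List Char := ['V', 'A', 'L', 'U', 'E', 'S']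

-- ===== PORT A =====
-- A's while loop, made total by a fuel parameter (fuel = len(s)+1 always suffices: each
-- iteration either stops or moves `start` at least 6 positions right while start ≤ len(s)).
def pvLoopA (s : List Char) (n : Int) : Nat → Int → List (List Char)
  | 0, _ => []
  | fuel + 1, idx =>
    if idx = -1 then []
    else
      -- start = idx + len('VALUES')
      let start := idx + 6
      (if start + n ≤ (s.length : Int) then
          [PySem.List.slice s (some start) (some (start + n))]   -- result.append(s[start:start+n])
        else [])
        ++ pvLoopA s n fuel (PySem.Chars.findFrom s pvVALUES start)  -- idx = s.find('VALUES', start)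

def extract_values_suffix (s : String) (n : Int) : String :=
  String.ofList
    (PySem.Chars.join []
      (pvLoopA s.toList n (s.toList.length + 1) (PySem.Chars.find s.toList pvVALUES)))

-- ===== PORT B =====
-- Source B: parts = [s[i+6:i+6+n] for i in range(L) if s.startswith('VALUES', i) and i+6+n <= L]
-- (s.startswith(p, i) with 0 ≤ i < len(s) is exactly `startswith (s.drop i) p`)
def extract_values_suffix_alt (s : String) (n : Int) : String :=
  let cs := s.toList
  let L := cs.length
  String.ofList
    (PySem.Chars.join []
      (((List.range L).filter (fun i =>
            PySem.Chars.startswith (cs.drop i) pvVALUES && decide ((i : Int) + 6 + n ≤ (L : Int)))).map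
        (fun i => PySem.List.slice cs (some ((i : Int) + 6)) (some ((i : Int) + 6 + n)))))

-- ===== PRECONDITION & SPEC =====
def Spec_extract_values_suffix (s : String) (n : Int) (out : String) : Prop := out = extract_values_suffix_alt s n
instance (s : String) (n : Int) (out : String) : Decidable (Spec_extract_values_suffix s n out) := by unfold Spec_extract_values_suffix; infer_instance

-- ===== CLAIM (what is proved, stated in full; the proofs are below) =====
def Claim_equal_extract_values_suffix : Prop := ∀ (s : String) (n : Int), Dom_extract_values_suffix s n → Spec_extract_values_suffix s n (extract_values_suffix s n)

-- ===== LEMMAS AND PROOFS =====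

-- B's per-index pipeline over an arbitrary index list (proof-side abbreviation)
def pvSeg (cs : List Char) (n : Int) (l : List Nat) : List (List Char) :=
  (l.filter (fun i =>
      PySem.Chars.startswith (cs.drop i) pvVALUES && decide ((i : Int) + 6 + n ≤ (cs.length : Int)))).map
    (fun i => PySem.List.slice cs (some ((i : Int) + 6)) (some ((i : Int) + 6 + n)))

lemma pvSeg_append (cs : List Char) (n : Int) (l₁ l₂ : List Nat) :
    pvSeg cs n (l₁ ++ l₂) = pvSeg cs n l₁ ++ pvSeg cs n l₂ := by
  simp [pvSeg, List.filter_append]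

lemma pvSeg_nil_of_no_match (cs : List Char) (n : Int) (l : List Nat)
    (h : ∀ i ∈ l, ¬ pvVALUES <+: cs.drop i) : pvSeg cs n l = [] := by
  have : l.filter (fun i =>
      PySem.Chars.startswith (cs.drop i) pvVALUES && decide ((i : Int) + 6 + n ≤ (cs.length : Int))) = [] := by
    rw [List.filter_eq_nil_iff]
    intro i hi
    simp only [Bool.and_eq_true, not_and]
    intro hs
    exact absurd ((PySem.Chars.startswith_iff _ _).mp hs) (h i hi)
  simp [pvSeg, this]

-- 'VALUES' has no self-overlap: a match at j excludes matches at j+1 … j+5.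
lemma pv_no_overlap (cs : List Char) (j i : Nat)
    (h2 : pvVALUES <+: cs.drop j) (hji : j < i) (hi6 : i < j + 6) :
    ¬ pvVALUES <+: cs.drop i := by
  obtain ⟨t, ht⟩ := h2
  have hdrop : cs.drop i = pvVALUES.drop (i - j) ++ t := by
    have : cs.drop i = (cs.drop j).drop (i - j) := by
      rw [List.drop_drop]; congr 1; omega
    rw [this, ← ht, List.drop_append_of_le_length (by simp [pvVALUES]; omega)]
  intro hpre
  obtain ⟨u, hu⟩ := hpre
  rw [hdrop] at hu
  have hd1 : 1 ≤ i - j := by omega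
  have hd5 : i - j ≤ 5 := by omega
  have hhead := congrArg List.head? hu
  interval_cases h : (i - j) <;> simp [pvVALUES] at hhead
  -- each case: head of V.drop d ++ t is a literal ≠ 'V'

-- Main invariant: A's loop resumed at `start` produces exactly B's parts for indices ≥ start.
lemma pv_main (cs : List Char) (n : Int) :
    ∀ (fuel start : Nat), start ≤ cs.length → cs.length < fuel + start →
      pvLoopA cs n fuel (PySem.Chars.findFrom cs pvVALUES (start : Int)) =
        pvSeg cs n (List.range' start (cs.length - start)) := by
  intro fuel
  induction fuel with
  | zero => intro start h1 h2; omega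
  | succ fuel ih =>
    intro start h1 h2
    by_cases hf : PySem.Chars.findFrom cs pvVALUES (start : Int) = -1
    · rw [hf]
      have hnin : ¬ pvVALUES <:+: cs.drop start :=
        (PySem.Chars.findFrom_natCast_eq_neg_one_iff cs pvVALUES start h1).mp hf
      rw [pvSeg_nil_of_no_match]
      · simp [pvLoopA]
      · intro i hi hpre
        have hsi : start ≤ i := (List.mem_range'_1.mp hi).1
        have : cs.drop i <:+ cs.drop start := by
          have : cs.drop i = (cs.drop start).drop (i - start) := by
            rw [List.drop_drop]; congr 1; omega
          rw [this]; exact List.drop_suffix _ _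
        exact hnin (hpre.isInfix.trans this.isInfix)
    · obtain ⟨hge, hpre, hmin⟩ := PySem.Chars.findFrom_natCast_spec cs pvVALUES start h1 hf
      set f := PySem.Chars.findFrom cs pvVALUES (start : Int) with hfdef
      set j := f.toNat with hjdef
      have hf0 : 0 ≤ f := le_trans (by exact_mod_cast Int.natCast_nonneg start) hge
      have hfj : f = (j : Int) := by omega
      have hsj : start ≤ j := by omega
      have hj6 : j + 6 ≤ cs.length := by
        have := hpre.length_le
        simp [pvVALUES, List.length_drop] at this
        omega
      -- unfold one iteration of A's loop
      have hstep :
          pvLoopA cs n (fuel + 1) f =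
            (if (j : Int) + 6 + n ≤ (cs.length : Int) then
                [PySem.List.slice cs (some ((j : Int) + 6)) (some ((j : Int) + 6 + n))]
              else [])
              ++ pvLoopA cs n fuel (PySem.Chars.findFrom cs pvVALUES ((j : Int) + 6)) := by
        rw [pvLoopA, if_neg hf, hfj]
      rw [hstep]
      -- B side: split the index range at j and j+6
      have hsplit : List.range' start (cs.length - start) =
          (List.range' start (j - start) ++ List.range' j 6) ++ List.range' (j + 6) (cs.length - (j + 6)) := by
        rw [List.append_assoc]
        have e1 : List.range' j 6 ++ List.range' (j + 6) (cs.length - (j + 6)) =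
            List.range' j (cs.length - j) := by
          have h := @List.range'_append j 6 (cs.length - (j + 6)) 1
          simp only [one_mul] at h
          rw [h]; congr 1; omega
        rw [e1]
        have h := @List.range'_append start (j - start) (cs.length - j) 1
        simp only [one_mul] at h
        rw [show start + (j - start) = j by omega] at h
        rw [h]; congr 1; omega
      rw [hsplit, pvSeg_append, pvSeg_append]
      -- indices in [start, j): no match (minimality of find)
      have hseg1 : pvSeg cs n (List.range' start (j - start)) = [] := by
        apply pvSeg_nil_of_no_match
        intro i hi
        obtain ⟨ha, hb⟩ := List.mem_range'_1.mp hi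
        exact hmin i ha (by omega)
      -- indices in [j, j+6): the match at j, then 5 overlap-free positions
      have hseg2 : pvSeg cs n (List.range' j 6) =
          (if (j : Int) + 6 + n ≤ (cs.length : Int) then
              [PySem.List.slice cs (some ((j : Int) + 6)) (some ((j : Int) + 6 + n))]
            else []) := by
        have e2 : List.range' j 6 = j :: List.range' (j + 1) 5 := by
          simp [List.range'_succ]
        rw [e2]
        have htail : pvSeg cs n (List.range' (j + 1) 5) = [] := by
          apply pvSeg_nil_of_no_match
          intro i hi
          obtain ⟨ha, hb⟩ := List.mem_range'_1.mp hi
          exact pv_no_overlap cs j i hpre (by omega) (by omega)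
        have hsw : PySem.Chars.startswith (cs.drop j) pvVALUES = true :=
          (PySem.Chars.startswith_iff _ _).mpr hpre
        by_cases hc : (j : Int) + 6 + n ≤ (cs.length : Int)
        · rw [if_pos hc]
          have : pvSeg cs n (j :: List.range' (j + 1) 5) =
              PySem.List.slice cs (some ((j : Int) + 6)) (some ((j : Int) + 6 + n)) ::
                pvSeg cs n (List.range' (j + 1) 5) := by
            simp [pvSeg, hsw, hc]
          rw [this, htail]
        · rw [if_neg hc]
          have : pvSeg cs n (j :: List.range' (j + 1) 5) = pvSeg cs n (List.range' (j + 1) 5) := by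
            simp [pvSeg, hsw, hc]
          rw [this, htail]
      -- indices ≥ j+6: the recursive call, by IH
      have hrec : pvLoopA cs n fuel (PySem.Chars.findFrom cs pvVALUES ((j : Int) + 6)) =
          pvSeg cs n (List.range' (j + 6) (cs.length - (j + 6))) := by
        have : ((j : Int) + 6) = ((j + 6 : Nat) : Int) := by push_cast; ring
        rw [this]
        exact ih (j + 6) hj6 (by omega)
      rw [hseg1, hseg2, hrec]
      simp

-- ===== VERDICT (by name: the statement is the Claim_ definition above) =====
theorem extract_values_suffix_spec : Claim_equal_extract_values_suffix := by
  intro s n _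
  unfold Spec_extract_values_suffix extract_values_suffix extract_values_suffix_alt
  have hfind : PySem.Chars.findFrom s.toList pvVALUES ((0 : Nat) : Int) =
      PySem.Chars.find s.toList pvVALUES := by
    rw [Nat.cast_zero, PySem.Chars.findFrom_zero]
  rw [← hfind, pv_main s.toList n (s.toList.length + 1) 0 (Nat.zero_le _) (by omega)]
  simp [pvSeg, List.range_eq_range']
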